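-- pv_equiv track=rewrite | github.com/grondak/t5code | src/t5sim/run.py | _filter_ships_by_role
-- ===== SOURCE A (Python) =====
-- def _filter_ships_by_role(raw_ships, include_civilian, include_military,
--                           include_specialized):
--     """Filter ship classes based on role selection.
--
--     Args:
--         raw_ships: Dictionary of all ship classes
--         include_civilian: Include civilian ships
--         include_military: Include military ships
--         include_specialized: Include specialized ships
--
--     Returns:
--         Dictionary of filtered ship classes
--
--     Raises:
--         ValueError: If a requested role has no ships available
--     """
--     # If no roles specified, include all ships
--     if not (include_civilian or include_military or include_specialized):
--         return raw_ships
--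
--     # Build list of requested roles
--     requested_roles = []
--     if include_civilian:
--         requested_roles.append("civilian")
--     if include_military:
--         requested_roles.append("military")
--     if include_specialized:
--         requested_roles.append("specialized")
--
--     # Check that each requested role has ships
--     available_roles = {ship["role"] for ship in raw_ships.values()}
--     for role in requested_roles:
--         if role not in available_roles:
--             raise ValueError(
--                 f"No ships with role '{role}' found in ship classes file"
--             )
--
--     # Filter ships by requested roles
--     filtered = {
--         name: ship_data
--         for name, ship_data in raw_ships.items()
--         if ship_data["role"] in requested_roles
--     }
--
--     if not filtered:
--         raise ValueError(
--             "No ships match the selected roles"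
--         )  # pragma: no cover (defensive)
--
--     return filtered
-- ===== SOURCE B (Python) =====
-- def _filter_ships_by_role(raw_ships, include_civilian, include_military,
--                           include_specialized):
--     """Filter ship classes by requested roles: group ships into role buckets once,
--     then pick the requested buckets and restore original order by index."""
--     if not (include_civilian or include_military or include_specialized):
--         return raw_ships
--
--     requested_roles = []
--     if include_civilian:
--         requested_roles.append("civilian")
--     if include_military:
--         requested_roles.append("military")
--     if include_specialized:
--         requested_roles.append("specialized")
--
--     # Group ships by role, remembering each ship's original position
--     buckets = {}
--     for i, (name, ship_data) in enumerate(raw_ships.items()):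
--         buckets.setdefault(ship_data["role"], []).append((i, name, ship_data))
--
--     # Collect requested buckets, raising on any role with no ships
--     kept = []
--     for role in requested_roles:
--         bucket = buckets.get(role)
--         if not bucket:
--             raise ValueError(
--                 f"No ships with role '{role}' found in ship classes file"
--             )
--         kept.extend(bucket)
--
--     # Restore original dict order
--     kept.sort(key=lambda t: t[0])
--     filtered = {name: ship_data for _, name, ship_data in kept}
--
--     if not filtered:
--         raise ValueError("No ships match the selected roles")
--
--     return filtered
-- ===== Notes on version B (the rewrite author's own statement) =====
-- stated objective: alternative
-- what changed: B replaces A's scan-and-filter (build the set of available roles, then a dict-comprehension membership filter) with a group-then-merge scheme: one pass buckets the ships by role together with their original positions, the requested buckets are concatenated (raising on an empty/missing bucket), and the original order is restored by sorting on the recorded index.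
import Mathlib
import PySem

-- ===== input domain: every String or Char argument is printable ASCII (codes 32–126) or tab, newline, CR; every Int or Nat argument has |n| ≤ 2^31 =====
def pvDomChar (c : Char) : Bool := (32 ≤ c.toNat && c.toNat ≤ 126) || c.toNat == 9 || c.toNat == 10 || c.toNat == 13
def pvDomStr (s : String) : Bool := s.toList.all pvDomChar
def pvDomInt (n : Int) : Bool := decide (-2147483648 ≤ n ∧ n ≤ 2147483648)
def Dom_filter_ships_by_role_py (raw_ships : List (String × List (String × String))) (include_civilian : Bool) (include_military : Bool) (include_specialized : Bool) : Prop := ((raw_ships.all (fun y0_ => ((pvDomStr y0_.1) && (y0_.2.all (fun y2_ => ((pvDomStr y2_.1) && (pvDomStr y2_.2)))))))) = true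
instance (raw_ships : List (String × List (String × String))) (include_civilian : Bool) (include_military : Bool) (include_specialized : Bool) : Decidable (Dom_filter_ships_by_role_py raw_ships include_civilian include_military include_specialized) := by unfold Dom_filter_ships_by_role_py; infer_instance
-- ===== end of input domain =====

-- B replaces A's scan-and-filter with group-then-merge: one pass buckets the ships by role
-- with their original positions, the requested buckets are concatenated and the original
-- order is restored by sorting on the recorded index (alternative decomposition, same task).

-- ===== PORT A =====
-- ship["role"]: first match in the association list; the "" default is never used under
-- Pre_filter_ships_by_role_py (a missing "role" key is a Python KeyError, excluded there).
def pvShipRole (d : List (String × String)) : String :=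
  ((d.find? (fun q => q.1 == "role")).map Prod.snd).getD ""

-- requested_roles built by the three appends
def pvRequestedRoles (include_civilian include_military include_specialized : Bool) : List String :=
  (if include_civilian then ["civilian"] else []) ++
  (if include_military then ["military"] else []) ++
  (if include_specialized then ["specialized"] else [])

def filter_ships_by_role_py (raw_ships : List (String × List (String × String))) (include_civilian : Bool) (include_military : Bool) (include_specialized : Bool) : List (String × List (String × String)) :=
  if !(include_civilian || include_military || include_specialized) then raw_ships
  else
    let requested_roles := pvRequestedRoles include_civilian include_military include_specialized
    -- available_roles = {ship["role"] for ship in raw_ships.values()}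
    let available_roles : PySem.Set String := PySem.Set.ofList (raw_ships.map (fun p => pvShipRole p.2))
    -- the for-loop raises ValueError on the first requested role not available: excluded by Pre_, [] stands for the raise
    if requested_roles.all (fun r => PySem.Set.contains available_roles r) then
      let filtered := raw_ships.filter (fun p => requested_roles.contains (pvShipRole p.2))
      if filtered.isEmpty then []  -- 'if not filtered: raise ValueError' — excluded by Pre_
      else filtered
    else []

-- ===== PORT B =====
-- buckets: for i, (name, ship_data) in enumerate(...): buckets.setdefault(role, []).append((i, name, ship_data))
def pvRoleBuckets (l : List (Int × String × List (String × String))) : PySem.Dict String (List (Int × String × List (String × String))) :=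
  l.foldl (fun d p => d.modify (pvShipRole p.2.2) [] (fun b => b ++ [p])) PySem.Dict.empty

def filter_ships_by_role_py_alt (raw_ships : List (String × List (String × String))) (include_civilian : Bool) (include_military : Bool) (include_specialized : Bool) : List (String × List (String × String)) :=
  if !(include_civilian || include_military || include_specialized) then raw_ships
  else
    let requested_roles := pvRequestedRoles include_civilian include_military include_specialized
    let buckets := pvRoleBuckets (PySem.List.enumerate raw_ships)
    -- 'if not bucket: raise ValueError' inside the kept-loop: excluded by Pre_, [] stands for the raise
    if requested_roles.all (fun r => !(buckets.getD r []).isEmpty) then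
      let kept := requested_roles.foldl (fun acc r => acc ++ buckets.getD r []) []
      let filtered := (PySem.List.sorted kept (fun t => t.1) false).map (fun t => t.2)
      if filtered.isEmpty then []  -- 'if not filtered: raise' — excluded by Pre_
      else filtered
    else []

-- ===== PRECONDITION & SPEC =====
-- Exactly where Python A returns: when some role is requested, every ship dict must have a
-- "role" key (else KeyError) and every requested role must occur among the ships (else ValueError).
def Pre_filter_ships_by_role_py (raw_ships : List (String × List (String × String))) (include_civilian : Bool) (include_military : Bool) (include_specialized : Bool) : Prop :=
  (include_civilian || include_military || include_specialized) = true →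
    ((∀ p ∈ raw_ships, ∃ q ∈ p.2, q.1 = "role") ∧
     (∀ r ∈ pvRequestedRoles include_civilian include_military include_specialized,
        ∃ p ∈ raw_ships, pvShipRole p.2 = r))
instance (raw_ships : List (String × List (String × String))) (include_civilian : Bool) (include_military : Bool) (include_specialized : Bool) : Decidable (Pre_filter_ships_by_role_py raw_ships include_civilian include_military include_specialized) := by unfold Pre_filter_ships_by_role_py; infer_instance

def pvWitness_filter_ships_by_role_py : (List (String × List (String × String))) × Bool × Bool × Bool :=
  ([("Scout", [("role", "military")]), ("Trader", [("role", "civilian")])], true, true, false)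

def Spec_filter_ships_by_role_py (raw_ships : List (String × List (String × String))) (include_civilian : Bool) (include_military : Bool) (include_specialized : Bool) (out : List (String × List (String × String))) : Prop := out = filter_ships_by_role_py_alt raw_ships include_civilian include_military include_specialized
instance (raw_ships : List (String × List (String × String))) (include_civilian : Bool) (include_military : Bool) (include_specialized : Bool) (out : List (String × List (String × String))) : Decidable (Spec_filter_ships_by_role_py raw_ships include_civilian include_military include_specialized out) := by unfold Spec_filter_ships_by_role_py; infer_instance

-- ===== CLAIM (what is proved, stated in full; the proofs are below) =====
def Claim_equal_filter_ships_by_role_py : Prop := ∀ (raw_ships : List (String × List (String × String))) (include_civilian : Bool) (include_military : Bool) (include_specialized : Bool), Dom_filter_ships_by_role_py raw_ships include_civilian include_military include_specialized → Pre_filter_ships_by_role_py raw_ships include_civilian include_military include_specialized → Spec_filter_ships_by_role_py raw_ships include_civilian include_military include_specialized (filter_ships_by_role_py raw_ships include_civilian include_military include_specialized)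

-- ===== LEMMAS AND PROOFS =====

-- The grouping fold: bucket r holds exactly the entries with role r, in input order.
theorem pvBuckets_getD (l : List (Int × String × List (String × String)))
    (d : PySem.Dict String (List (Int × String × List (String × String)))) (r : String) :
    (l.foldl (fun d p => d.modify (pvShipRole p.2.2) [] (fun b => b ++ [p])) d).getD r []
      = d.getD r [] ++ l.filter (fun p => pvShipRole p.2.2 == r) := by
  induction l generalizing d with
  | nil => simp
  | cons h t ih =>
    rw [List.foldl_cons, List.filter_cons, ih]
    by_cases hk : pvShipRole h.2.2 = r
    · rw [hk, PySem.Dict.getD_modify_self]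
      simp
    · rw [PySem.Dict.getD_modify_of_ne (hne := Ne.symm hk)]
      simp [hk]

-- Disjoint predicates: filtering the union splits, up to permutation, into the two filters.
theorem pvFilter_or_perm {α : Type} (p q : α → Bool) (hdis : ∀ x, p x = true → q x = false)
    (l : List α) :
    (l.filter (fun x => p x || q x)).Perm (l.filter p ++ l.filter q) := by
  induction l with
  | nil => simp
  | cons h t ih =>
    rw [List.filter_cons, List.filter_cons, List.filter_cons]
    by_cases hp : p h = true
    · have hq := hdis h hp
      simp only [hp, hq, Bool.true_or, if_pos, Bool.false_eq_true, ite_false]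
      exact (ih.cons h)
    · simp only [Bool.not_eq_true] at hp
      by_cases hq : q h = true
      · simp only [hp, hq, Bool.false_or, ite_true, Bool.false_eq_true, ite_false]
        exact (ih.cons h).trans (List.perm_middle.symm)
      · simp only [Bool.not_eq_true] at hq
        simp [hp, hq, ih]

-- Concatenating the per-role filters over a duplicate-free role list is, up to
-- permutation, the single membership filter.
theorem pvFlatMap_filter_perm (req : List String) (hnd : req.Nodup)
    (l : List (Int × String × List (String × String))) :
    (l.filter (fun p => req.contains (pvShipRole p.2.2))).Perm
      (req.flatMap (fun r => l.filter (fun p => pvShipRole p.2.2 == r))) := by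
  induction req with
  | nil => simp
  | cons r rs ih =>
    rw [List.nodup_cons] at hnd
    rw [List.flatMap_cons]
    have hsplit := pvFilter_or_perm (fun p => pvShipRole p.2.2 == r)
      (fun p => rs.contains (pvShipRole p.2.2))
      (fun p hp => by
        have : pvShipRole p.2.2 = r := by simpa using hp
        simp [this, hnd.1]) l
    have : (fun p : Int × String × List (String × String) => (r :: rs).contains (pvShipRole p.2.2))
        = (fun p => (pvShipRole p.2.2 == r) || rs.contains (pvShipRole p.2.2)) := by
      funext p; simp [beq_eq_decide]
    rw [this]
    exact hsplit.trans ((ih hnd.2).append_left _)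

-- ===== VERDICT (by name: the statement is the Claim_ definition above) =====
theorem filter_ships_by_role_py_spec : Claim_equal_filter_ships_by_role_py := by
  intro raw c m s _ hpre
  unfold Spec_filter_ships_by_role_py filter_ships_by_role_py filter_ships_by_role_py_alt
  by_cases hflag : (c || m || s) = true
  · simp only [hflag, Bool.not_true, Bool.false_eq_true, if_false]
    obtain ⟨_, hreq⟩ := hpre hflag
    have hnd : (pvRequestedRoles c m s).Nodup := by
      cases c <;> cases m <;> cases s <;> decide
    have hne : pvRequestedRoles c m s ≠ [] := by
      cases c <;> cases m <;> cases s <;> simp_all [pvRequestedRoles]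
    -- every requested role has an entry in the enumerate list
    have hent : ∀ r ∈ pvRequestedRoles c m s,
        ∃ q ∈ PySem.List.enumerate raw, pvShipRole q.2.2 = r := by
      intro r hr
      rcases hreq r hr with ⟨p, hp, hrole⟩
      rw [← PySem.List.map_snd_enumerate raw 0] at hp
      rcases List.mem_map.mp hp with ⟨q, hq, hq2⟩
      exact ⟨q, hq, by rw [hq2]; exact hrole⟩
    -- A's guard
    have havail : (pvRequestedRoles c m s).all
        (fun r => PySem.Set.contains (PySem.Set.ofList (raw.map (fun p => pvShipRole p.2))) r) = true := by
      rw [List.all_eq_true]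
      intro r hr
      rcases hreq r hr with ⟨p, hp, hrole⟩
      rw [PySem.Set.contains_iff, PySem.Set.mem_ofList]
      exact List.mem_map.mpr ⟨p, hp, hrole⟩
    -- the buckets of B's grouping pass
    have hbuck : ∀ r, (pvRoleBuckets (PySem.List.enumerate raw)).getD r []
        = (PySem.List.enumerate raw).filter (fun q => pvShipRole q.2.2 == r) := by
      intro r
      rw [pvRoleBuckets, pvBuckets_getD]
      simp
    -- B's guard
    have hseen : (pvRequestedRoles c m s).all
        (fun r => !((pvRoleBuckets (PySem.List.enumerate raw)).getD r []).isEmpty) = true := by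
      rw [List.all_eq_true]
      intro r hr
      rcases hent r hr with ⟨q, hq, hrole⟩
      rw [hbuck r]
      simp only [Bool.not_eq_eq_eq_not, Bool.not_true, List.isEmpty_eq_false_iff_exists_mem]
      exact ⟨q, List.mem_filter.mpr ⟨hq, by simp [hrole]⟩⟩
    -- kept = flatMap of the requested buckets
    have hkept : (pvRequestedRoles c m s).foldl
        (fun acc r => acc ++ (pvRoleBuckets (PySem.List.enumerate raw)).getD r []) []
      = (pvRequestedRoles c m s).flatMap
          (fun r => (PySem.List.enumerate raw).filter (fun q => pvShipRole q.2.2 == r)) := by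
      rw [PySem.List.foldl_append_eq_flatMap]
      exact List.flatMap_congr (fun r _ => hbuck r)
    -- sorting by the recorded index restores the membership filter of the enumerate list
    have hsorted : PySem.List.sorted
        ((pvRequestedRoles c m s).foldl
          (fun acc r => acc ++ (pvRoleBuckets (PySem.List.enumerate raw)).getD r []) [])
        (fun t => t.1) false
      = (PySem.List.enumerate raw).filter
          (fun q => (pvRequestedRoles c m s).contains (pvShipRole q.2.2)) := by
      apply PySem.List.sorted_eq_of_perm_of_pairwise_lt
      · rw [hkept]
        exact pvFlatMap_filter_perm _ hnd _
      · exact List.Pairwise.sublist List.filter_sublist (PySem.List.pairwise_lt_enumerate raw 0)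
    -- dropping the indices gives A's filter of the raw list
    have hmap : ((PySem.List.enumerate raw).filter
          (fun q => (pvRequestedRoles c m s).contains (pvShipRole q.2.2))).map (fun t => t.2)
        = raw.filter (fun p => (pvRequestedRoles c m s).contains (pvShipRole p.2)) := by
      conv_rhs => rw [← PySem.List.map_snd_enumerate raw 0, List.filter_map]
      rfl
    simp only [havail, hseen, if_true, hsorted, hmap]
  · simp [hflag]
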